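-- pv_equiv track=rewrite | github.com/mohammadrasool33/cipher-operation | monoalphabetic_encryption.py | create_substitution_key
-- ===== SOURCE A (Python) =====
-- from typing import Dict
--
-- def create_substitution_key(shift: int) -> Dict[str, str]:
--     """
--     Create a substitution key for the monoalphabetic cipher
--     Parameters:
--         shift (int): The shift value to create the substitution alphabet
--     Returns:
--         Dict[str, str]: Dictionary mapping each letter to its substitution
--     """
--     # Create substitution for uppercase and lowercase letters
--     substitution = {}
--
--     # Create mapping for uppercase letters (A-Z)
--     for i in range(26):
--         original = chr(ord('A') + i)
--         substituted = chr(ord('A') + ((i + shift) % 26))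
--         substitution[original] = substituted
--
--     # Create mapping for lowercase letters (a-z)
--     for i in range(26):
--         original = chr(ord('a') + i)
--         substituted = chr(ord('a') + ((i + shift) % 26))
--         substitution[original] = substituted
--
--     return substitution
-- ===== SOURCE B (Python) =====
-- def create_substitution_key(shift):
--     """Rotated-alphabet table: compute shift % 26 once, slice-rotate each
--     alphabet and zip it against the original instead of per-letter modular
--     arithmetic in a loop."""
--     s = shift % 26
--     upper = [chr(c) for c in range(ord('A'), ord('A') + 26)]
--     lower = [chr(c) for c in range(ord('a'), ord('a') + 26)]
--     return {**dict(zip(upper, upper[s:] + upper[:s])),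
--             **dict(zip(lower, lower[s:] + lower[:s]))}
-- ===== Notes on version B (the rewrite author's own statement) =====
-- stated objective: idiomatic
-- what changed: B precomputes shift % 26 once and builds the table by zipping each alphabet with its slice-rotation, instead of computing each substituted letter with per-index modular arithmetic inside two loops.
import Mathlib
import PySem

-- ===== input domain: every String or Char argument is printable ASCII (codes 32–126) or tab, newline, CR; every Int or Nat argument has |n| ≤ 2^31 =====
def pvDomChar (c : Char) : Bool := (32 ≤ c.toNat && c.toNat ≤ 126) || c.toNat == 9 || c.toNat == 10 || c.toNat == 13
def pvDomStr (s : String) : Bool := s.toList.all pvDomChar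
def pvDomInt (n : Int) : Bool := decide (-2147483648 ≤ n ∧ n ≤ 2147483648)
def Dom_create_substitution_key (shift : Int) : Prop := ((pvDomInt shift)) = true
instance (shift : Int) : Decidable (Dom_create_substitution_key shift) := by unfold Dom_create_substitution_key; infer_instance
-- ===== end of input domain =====

-- B builds the table by zipping each alphabet with its shift%26 slice-rotation instead of per-letter modular arithmetic in two loops (idiomatic; equal values).


-- ===== PORT A =====
-- chr(n) for 65 ≤ n ≤ 122 is exactly Char.ofNat n.toNat (ASCII range)
def create_substitution_key (shift : Int) : List (String × String) :=
  let substitution : PySem.Dict String String := PySem.Dict.empty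
  let substitution := (PySem.List.pyRange 0 26 1).foldl (fun d i =>
    let original := String.ofList [Char.ofNat (65 + i).toNat]
    let substituted := String.ofList [Char.ofNat (65 + PySem.Int.mod (i + shift) 26).toNat]
    d.insert original substituted) substitution
  let substitution := (PySem.List.pyRange 0 26 1).foldl (fun d i =>
    let original := String.ofList [Char.ofNat (97 + i).toNat]
    let substituted := String.ofList [Char.ofNat (97 + PySem.Int.mod (i + shift) 26).toNat]
    d.insert original substituted) substitution
  substitution.items

-- ===== PORT B =====
def create_substitution_key_alt (shift : Int) : List (String × String) :=
  let s := PySem.Int.mod shift 26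
  let upper := (PySem.List.pyRange 65 91 1).map (fun c => String.ofList [Char.ofNat c.toNat])
  let lower := (PySem.List.pyRange 97 123 1).map (fun c => String.ofList [Char.ofNat c.toNat])
  let du : PySem.Dict String String :=
    PySem.Dict.ofList (upper.zip (PySem.List.slice upper (some s) none ++ PySem.List.slice upper none (some s)))
  let dl : PySem.Dict String String :=
    PySem.Dict.ofList (lower.zip (PySem.List.slice lower (some s) none ++ PySem.List.slice lower none (some s)))
  (du.update dl.items).items

-- ===== PRECONDITION & SPEC =====
def Spec_create_substitution_key (shift : Int) (out : List (String × String)) : Prop := out = create_substitution_key_alt shift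
instance (shift : Int) (out : List (String × String)) : Decidable (Spec_create_substitution_key shift out) := by unfold Spec_create_substitution_key; infer_instance

-- ===== CLAIM (what is proved, stated in full; the proofs are below) =====
def Claim_equal_create_substitution_key : Prop := ∀ (shift : Int), Dom_create_substitution_key shift → Spec_create_substitution_key shift (create_substitution_key shift)

-- ===== LEMMAS AND PROOFS =====

-- Both programs depend only on shift % 26.
theorem csk_a_mod (shift : Int) :
    create_substitution_key shift = create_substitution_key (PySem.Int.mod shift 26) := by
  have hmod : ∀ i : Int, PySem.Int.mod (i + PySem.Int.mod shift 26) 26 = PySem.Int.mod (i + shift) 26 := by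
    intro i
    rw [PySem.Int.mod_eq_emod_of_pos (by norm_num), PySem.Int.mod_eq_emod_of_pos (by norm_num),
        PySem.Int.mod_eq_emod_of_pos (by norm_num)]
    omega
  simp only [create_substitution_key, hmod]

theorem csk_b_mod (shift : Int) :
    create_substitution_key_alt shift = create_substitution_key_alt (PySem.Int.mod shift 26) := by
  have hidem : PySem.Int.mod (PySem.Int.mod shift 26) 26 = PySem.Int.mod shift 26 := by
    rw [PySem.Int.mod_eq_emod_of_pos (by norm_num), PySem.Int.mod_eq_emod_of_pos (by norm_num)]
    omega
  simp only [create_substitution_key_alt, hidem]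

-- ===== VERDICT (by name: the statement is the Claim_ definition above) =====
set_option maxRecDepth 8192 in
set_option maxHeartbeats 1000000 in
theorem create_substitution_key_spec : Claim_equal_create_substitution_key := by
  intro shift _
  unfold Spec_create_substitution_key
  rw [csk_a_mod, csk_b_mod]
  have h0 : 0 ≤ PySem.Int.mod shift 26 := PySem.Int.mod_nonneg shift (by norm_num)
  have h1 : PySem.Int.mod shift 26 < 26 := PySem.Int.mod_lt shift (by norm_num)
  set r := PySem.Int.mod shift 26 with hr
  clear_value r
  interval_cases r <;> decide
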